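-- pv_equiv track=rewrite | github.com/nodelanglois/Formation-NSI | ManipulationDonnees/prenom.py | populaire
-- ===== SOURCE A (Python) =====
-- def populaire(dic,debut,fin):
--     listePopu = []
--     for prenom in dic.keys():
--         Nombre = 0
--         for annee in range(debut,fin+1):
--             if annee in dic[prenom].keys():
--                 Nombre += dic[prenom][annee]
--         listePopu.append((prenom,Nombre))
--     return sorted(listePopu, key=lambda listePopu : listePopu[1] , reverse=True)
-- ===== SOURCE B (Python) =====
-- def populaire(dic, debut, fin):
--     totaux = [(prenom, sum(n for annee, n in d.items() if debut <= annee <= fin))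
--               for prenom, d in dic.items()]
--     return sorted(totaux, key=lambda t: t[1], reverse=True)
-- ===== Notes on version B (the rewrite author's own statement) =====
-- stated objective: alternative
-- what changed: Instead of scanning every year in range(debut, fin+1) and probing the inner dict for each, B iterates once over each name's recorded (year, count) items and keeps those inside [debut, fin], then sorts as before (cheaper when the range is much larger than the recorded entries, but not measurably faster overall).
import Mathlib
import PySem

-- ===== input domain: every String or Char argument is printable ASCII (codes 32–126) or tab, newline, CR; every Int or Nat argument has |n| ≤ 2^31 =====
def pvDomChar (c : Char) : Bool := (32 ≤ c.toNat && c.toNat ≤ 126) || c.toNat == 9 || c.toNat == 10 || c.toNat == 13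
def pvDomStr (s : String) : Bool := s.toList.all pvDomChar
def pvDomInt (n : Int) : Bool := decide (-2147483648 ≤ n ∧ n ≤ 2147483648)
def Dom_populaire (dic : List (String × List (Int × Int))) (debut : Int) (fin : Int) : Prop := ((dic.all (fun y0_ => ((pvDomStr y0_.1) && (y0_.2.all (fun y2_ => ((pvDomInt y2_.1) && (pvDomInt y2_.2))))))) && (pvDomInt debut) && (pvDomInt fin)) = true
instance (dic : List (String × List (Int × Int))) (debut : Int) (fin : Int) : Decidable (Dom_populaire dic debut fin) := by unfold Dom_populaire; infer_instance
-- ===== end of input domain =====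

-- B replaces A's per-name scan of every year in range(debut, fin+1) by one pass over the
-- name's recorded (year, count) items filtered to [debut, fin] (objective: alternative).

-- ===== PORT A =====
-- for prenom in dic.keys(): Nombre = 0; for annee in range(debut, fin+1):
--   if annee in dic[prenom].keys(): Nombre += dic[prenom][annee]; listePopu.append(...)
-- (dicts are assoc lists with distinct keys, see Pre_; 'annee in keys' / 'dic[prenom][annee]'
--  is first-match lookup = List.lookup)
def populaire (dic : List (String × List (Int × Int))) (debut : Int) (fin : Int) : List (String × Int) :=
  let listePopu := dic.foldl (fun acc p =>
    let nombre := (PySem.List.pyRange debut (fin + 1) 1).foldl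
      (fun n annee =>
        if (List.lookup annee p.2).isSome then n + (List.lookup annee p.2).getD 0 else n) 0
    acc ++ [(p.1, nombre)]) []
  PySem.List.sorted listePopu (fun q => q.2) true

-- ===== PORT B =====
-- totaux = [(prenom, sum(n for annee, n in d.items() if debut <= annee <= fin)) for prenom, d in dic.items()]
-- return sorted(totaux, key=lambda t: t[1], reverse=True)
def populaire_alt (dic : List (String × List (Int × Int))) (debut : Int) (fin : Int) : List (String × Int) :=
  PySem.List.sorted
    (dic.map (fun p =>
      (p.1, p.2.foldl (fun s av => if debut ≤ av.1 ∧ av.1 ≤ fin then s + av.2 else s) 0)))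
    (fun q => q.2) true

-- ===== PRECONDITION & SPEC =====
-- Pre_ excludes assoc lists with duplicate keys (outer names or years inside one name): a Python
-- dict cannot have duplicate keys, so such lists are not faithful representations of A's input.
def Pre_populaire (dic : List (String × List (Int × Int))) (debut : Int) (fin : Int) : Prop :=
  (dic.map (·.1)).Nodup ∧ ∀ p ∈ dic, (p.2.map (·.1)).Nodup
instance (dic : List (String × List (Int × Int))) (debut : Int) (fin : Int) : Decidable (Pre_populaire dic debut fin) := by unfold Pre_populaire; infer_instance

def pvWitness_populaire : (List (String × List (Int × Int))) × Int × Int :=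
  ([("alice", [(2000, 3), (1990, 1)]), ("bob", [(2000, 3), (2001, 2)])], 1999, 2001)

def Spec_populaire (dic : List (String × List (Int × Int))) (debut : Int) (fin : Int) (out : List (String × Int)) : Prop := out = populaire_alt dic debut fin
instance (dic : List (String × List (Int × Int))) (debut : Int) (fin : Int) (out : List (String × Int)) : Decidable (Spec_populaire dic debut fin out) := by unfold Spec_populaire; infer_instance

-- ===== CLAIM (what is proved, stated in full; the proofs are below) =====
def Claim_equal_populaire : Prop := ∀ (dic : List (String × List (Int × Int))) (debut : Int) (fin : Int), Dom_populaire dic debut fin → Pre_populaire dic debut fin → Spec_populaire dic debut fin (populaire dic debut fin)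

-- ===== LEMMAS AND PROOFS =====

-- sum of an indicator over a duplicate-free list
theorem pv_sum_indicator (xs : List Int) (hx : xs.Nodup) (k v : Int) :
    (xs.map (fun a => if a = k then v else 0)).sum = if k ∈ xs then v else 0 := by
  induction xs with
  | nil => simp
  | cons x t ih =>
    rcases List.nodup_cons.mp hx with ⟨hxt, ht⟩
    by_cases hk : x = k
    · subst hk
      simp [ih ht, hxt]
    · simp [hk, ih ht, Ne.symm hk]

-- the range-probe sum equals the filtered-items sum, for duplicate-free inner keys
theorem pv_inner (debut fin : Int) (items : List (Int × Int))
    (h : (items.map (·.1)).Nodup) :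
    ((PySem.List.pyRange debut (fin + 1) 1).map
        (fun a => (List.lookup a items).getD 0)).sum
      = (items.map (fun av => if debut ≤ av.1 ∧ av.1 ≤ fin then av.2 else 0)).sum := by
  induction items with
  | nil => simp
  | cons kv t ih =>
    rcases List.nodup_cons.mp h with ⟨hkt, ht⟩
    have hnone : List.lookup kv.1 t = none := by
      rw [List.lookup_eq_none_iff]
      intro a ha
      have hne : kv.1 ≠ a.1 := by
        intro hk
        exact hkt (by rw [show (fun x => x.1) kv = a.1 from hk]; exact List.mem_map_of_mem ha)
      simpa using hne
    have hfun : ∀ a, (List.lookup a (kv :: t)).getD 0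
        = (if a = kv.1 then kv.2 else 0) + (List.lookup a t).getD 0 := by
      intro a
      by_cases hak : a = kv.1
      · subst hak; simp [List.lookup, hnone]
      · have hb : (a == kv.1) = false := by simpa using hak
        simp [List.lookup, hb]
        exact fun hk => absurd hk hak
    calc ((PySem.List.pyRange debut (fin + 1) 1).map
            (fun a => (List.lookup a (kv :: t)).getD 0)).sum
        = ((PySem.List.pyRange debut (fin + 1) 1).map
            (fun a => (if a = kv.1 then kv.2 else 0) + (List.lookup a t).getD 0)).sum := by
          exact congrArg List.sum (List.map_congr_left (fun a _ => hfun a))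
      _ = ((PySem.List.pyRange debut (fin + 1) 1).map
            (fun a => if a = kv.1 then kv.2 else 0)).sum
          + ((PySem.List.pyRange debut (fin + 1) 1).map
            (fun a => (List.lookup a t).getD 0)).sum := by
          rw [← List.sum_map_add]
      _ = (if debut ≤ kv.1 ∧ kv.1 ≤ fin then kv.2 else 0)
          + (t.map (fun av => if debut ≤ av.1 ∧ av.1 ≤ fin then av.2 else 0)).sum := by
          rw [pv_sum_indicator _ (PySem.List.nodup_pyRange_one debut (fin + 1)), ih ht]
          congr 1
          simp only [PySem.List.mem_pyRange_one, Int.lt_add_one_iff]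
      _ = _ := by simp

theorem pv_entry (debut fin : Int) (p : String × List (Int × Int))
    (h : (p.2.map (·.1)).Nodup) :
    (PySem.List.pyRange debut (fin + 1) 1).foldl
      (fun n annee =>
        if (List.lookup annee p.2).isSome then n + (List.lookup annee p.2).getD 0 else n) 0
    = p.2.foldl (fun s av => if debut ≤ av.1 ∧ av.1 ≤ fin then s + av.2 else s) 0 := by
  have hl : (PySem.List.pyRange debut (fin + 1) 1).foldl
      (fun n annee =>
        if (List.lookup annee p.2).isSome then n + (List.lookup annee p.2).getD 0 else n) 0
      = (PySem.List.pyRange debut (fin + 1) 1).foldl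
        (fun n annee => n + (List.lookup annee p.2).getD 0) 0 := by
    apply PySem.List.foldl_congr_mem
    intro n a _
    cases hcase : List.lookup a p.2 <;> simp
  have hr : p.2.foldl (fun s av => if debut ≤ av.1 ∧ av.1 ≤ fin then s + av.2 else s) 0
      = p.2.foldl (fun s av => s + (if debut ≤ av.1 ∧ av.1 ≤ fin then av.2 else 0)) 0 := by
    apply PySem.List.foldl_congr_mem
    intro s av _
    by_cases hc : debut ≤ av.1 ∧ av.1 ≤ fin <;> simp [hc]
  rw [hl, hr, PySem.List.foldl_add, PySem.List.foldl_add, pv_inner debut fin p.2 h]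

-- ===== VERDICT (by name: the statement is the Claim_ definition above) =====
theorem populaire_spec : Claim_equal_populaire := by
  intro dic debut fin _ hpre
  unfold Spec_populaire populaire populaire_alt
  rw [PySem.List.foldl_append_singleton_eq_map]
  simp only [List.nil_append]
  congr 1
  exact List.map_congr_left (fun p hp => by rw [pv_entry debut fin p (hpre.2 p hp)])
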